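-- pv_equiv track=rewrite | github.com/2SOOY/problem-solving | boj_잃어버린괄호.py | solution
-- ===== SOURCE A (Python) =====
-- operator = '+-'
--
-- def translate_expression(expression):
--     numbers = []
--     operators = []
--     temp = ''
--
--     for char in expression:
--         if char not in operator:
--             temp += char # 숫자의 경우 문자 이어 붙이기
--             continue
--
--         # 연산자의 경우
--         # 지금까지 저장한 숫자 추가, 연산자 추가
--         # 숫자 정보 초기화
--         numbers.append(int(temp))
--         operators.append(char)
--         temp = ''
--
--     numbers.append(int(temp))
--
--     return [numbers, operators]
--
-- def calculate(numbers, operators):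
--     answer = numbers[0]
--
--     for i in range(len(operators)):
--         if operators[i] == '-':
--             answer -= numbers[i + 1]
--         else:
--             answer += numbers[i + 1]
--
--     return answer
--
-- def solution(expression):
--     answer = 0
--     numbers, operators = translate_expression(expression)
--
--     # 최소값 계산을 위해 만들 새로운 숫자, 연산자 리스트
--     new_numbers = [numbers[0]]
--     new_operators = []
--
--     for i in range(len(operators)):
--         # - 나올 시, 다음 -가 나오기 전까지 => 괄호를 한꺼번에 칠 수도 있음 => 최소값
--         # - 연산자 => 새로운 숫자, 연산자 배열에 정보 추가
--         if operators[i] == '-':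
--             new_numbers.append(numbers[i + 1])
--             new_operators.append(operators[i])
--
--         # + 연산자 => 전부 더한다
--         else:
--             num1 = new_numbers.pop()
--             num2 = numbers[i + 1]
--             new_numbers.append(num1 + num2)
--
--     answer = calculate(new_numbers, new_operators)
--
--     return answer
-- ===== SOURCE B (Python) =====
-- def solution(expression):
--     segments = expression.split('-')
--     total = sum(int(t) for t in segments[0].split('+'))
--     for seg in segments[1:]:
--         total -= sum(int(t) for t in seg.split('+'))
--     return total
-- ===== Notes on version B (the rewrite author's own statement) =====
-- stated objective: simpler
-- what changed: Replaces A's char-by-char parser with parallel number/operator lists, a stack-style '+'-grouping pass and a final calculate loop by delimiter-based splitting: split on '-', sum each segment's '+'-separated ints, subtract all segments after the first.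
import Mathlib
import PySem

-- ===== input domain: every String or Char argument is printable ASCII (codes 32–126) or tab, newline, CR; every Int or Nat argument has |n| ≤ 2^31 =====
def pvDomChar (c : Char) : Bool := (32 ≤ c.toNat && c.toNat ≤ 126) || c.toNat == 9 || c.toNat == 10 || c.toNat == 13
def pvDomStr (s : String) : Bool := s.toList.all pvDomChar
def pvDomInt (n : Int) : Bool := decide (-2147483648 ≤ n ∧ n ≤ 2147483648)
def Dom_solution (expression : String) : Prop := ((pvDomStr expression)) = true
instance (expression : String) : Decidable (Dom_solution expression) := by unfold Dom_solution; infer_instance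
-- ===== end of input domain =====

-- B replaces A's char-by-char parser + stack-style '+'-grouping + final calculate loop by
-- delimiter-based splitting (split on '-', sum each segment's '+'-separated ints, subtract the
-- segments after the first); objective: simpler.

-- ===== PORT A =====

-- int(temp): total form; Pre_solution guarantees every parsed piece is a valid int literal,
-- so the default 0 is never reached on admitted inputs.
def pyIntD (cs : List Char) : Int := (PySem.Int.ofChars? cs).getD 0

-- translate_expression: one pass over the characters keeping (numbers, operators, temp)
def translateExpression (expression : List Char) :
    List Int × List Char :=
  let st := expression.foldl
    (fun (st : List Int × List Char × List Char) c =>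
      let (numbers, operators, temp) := st
      if ¬ (c = '+' ∨ c = '-') then
        (numbers, operators, temp ++ [c])
      else
        (numbers ++ [pyIntD temp], operators ++ [c], []))
    ([], [], [])
  (st.1 ++ [pyIntD st.2.2], st.2.1)

-- calculate(numbers, operators): for i in range(len(operators)): ± numbers[i+1]
def calculate (numbers : List Int) (operators : List Char) : Int :=
  (PySem.List.pyRange 0 operators.length 1).foldl
    (fun answer i =>
      if PySem.List.pyGetD operators i ' ' = '-' then
        answer - PySem.List.pyGetD numbers (i + 1) 0
      else
        answer + PySem.List.pyGetD numbers (i + 1) 0)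
    (PySem.List.pyGetD numbers 0 0)

def solution (expression : String) : Int :=
  let t := translateExpression expression.toList
  let numbers := t.1
  let operators := t.2
  let st := (PySem.List.pyRange 0 operators.length 1).foldl
    (fun (st : List Int × List Char) i =>
      let (newNumbers, newOperators) := st
      if PySem.List.pyGetD operators i ' ' = '-' then
        (newNumbers ++ [PySem.List.pyGetD numbers (i + 1) 0],
         newOperators ++ [PySem.List.pyGetD operators i ' '])
      else
        -- num1 = new_numbers.pop(); new_numbers.append(num1 + numbers[i+1])
        (newNumbers.dropLast ++
           [PySem.List.pyGetD newNumbers (-1) 0 + PySem.List.pyGetD numbers (i + 1) 0],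
         newOperators))
    ([PySem.List.pyGetD numbers 0 0], [])
  calculate st.1 st.2

-- ===== PORT B =====

-- str.split with a single-character separator, ported by hand (exact for 1-char separators:
-- ''.split(d) = [''], and every occurrence of d cuts, keeping empty pieces)
def splitChar (d : Char) : List Char → List (List Char)
  | [] => [[]]
  | c :: cs =>
    if c = d then [] :: splitChar d cs
    else
      match splitChar d cs with
      | [] => [[c]]          -- unreachable: splitChar never returns []
      | p :: ps => (c :: p) :: ps

-- sum(int(t) for t in seg.split('+'))
def segSum (seg : List Char) : Int := ((splitChar '+' seg).map pyIntD).sum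

def solution_alt (expression : String) : Int :=
  match splitChar '-' expression.toList with
  | [] => 0                  -- unreachable: splitChar never returns []
  | s0 :: rest => rest.foldl (fun total seg => total - segSum seg) (segSum s0)

-- ===== PRECONDITION & SPEC =====

-- Pre_ excludes exactly the inputs where Python's int() raises ValueError in both programs:
-- some run between '+'/'-' delimiters is not a valid int literal (e.g. '', '1-+2', 'a+b').
def Pre_solution (expression : String) : Prop :=
  ∀ p ∈ ((PySem.Chars.splitOn expression.toList ['-']).flatMap
           (fun s => PySem.Chars.splitOn s ['+'])),
    (PySem.Int.ofChars? p).isSome = true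
instance (expression : String) : Decidable (Pre_solution expression) := by
  unfold Pre_solution; infer_instance

def pvWitness_solution : String := "12345-678+90"

def Spec_solution (expression : String) (out : Int) : Prop := out = solution_alt expression
instance (expression : String) (out : Int) : Decidable (Spec_solution expression out) := by unfold Spec_solution; infer_instance

-- ===== CLAIM (what is proved, stated in full; the proofs are below) =====
def Claim_equal_solution : Prop := ∀ (expression : String), Dom_solution expression → Pre_solution expression → Spec_solution expression (solution expression)

-- ===== LEMMAS AND PROOFS =====

def withTemp (temp : List Char) : List (List Char) → List (List Char)
  | [] => [temp]
  | p :: ps => (temp ++ p) :: ps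

def piecesR : List Char → List (List Char)
  | [] => [[]]
  | c :: cs =>
    if c = '+' ∨ c = '-' then [] :: piecesR cs
    else
      match piecesR cs with
      | [] => [[c]]
      | p :: ps => (c :: p) :: ps

def delimsR (cs : List Char) : List Char := cs.filter (fun c => c == '+' || c == '-')

def plusPairs (seg : List Char) : List (Char × Int) :=
  (splitChar '+' seg).tail.map (fun p => ('+', pyIntD p))

def segToks (seg : List Char) : List (Char × Int) :=
  ('-', pyIntD ((splitChar '+' seg).headI)) :: plusPairs seg

def gstep (st : List Int × List Char) (c : Char) (v : Int) : List Int × List Char :=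
  if c = '-' then (st.1 ++ [v], st.2 ++ [c])
  else (st.1.dropLast ++ [PySem.List.pyGetD st.1 (-1) 0 + v], st.2)

def cstep (answer : Int) (c : Char) (v : Int) : Int :=
  if c = '-' then answer - v else answer + v

theorem splitChar_ne_nil (d : Char) (cs : List Char) : splitChar d cs ≠ [] := by
  induction cs with
  | nil => simp [splitChar]
  | cons c cs ih =>
    simp only [splitChar]
    split
    · simp
    · cases h : splitChar d cs <;> simp

theorem piecesR_ne_nil (cs : List Char) : piecesR cs ≠ [] := by
  induction cs with
  | nil => simp [piecesR]
  | cons c cs ih =>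
    simp only [piecesR]
    split
    · simp
    · cases h : piecesR cs <;> simp

theorem piecesR_length (cs : List Char) :
    (piecesR cs).length = (delimsR cs).length + 1 := by
  induction cs with
  | nil => simp [piecesR, delimsR]
  | cons c cs ih =>
    by_cases hc : c = '+' ∨ c = '-'
    · have hb : (c == '+' || c == '-') = true := by
        rcases hc with h | h <;> simp [h]
      simp [piecesR, delimsR, hc, hb, ih, delimsR] at *
    · have hb : (c == '+' || c == '-') = false := by
        simp only [Bool.or_eq_false_iff, beq_eq_false_iff_ne]
        exact ⟨fun h => hc (Or.inl h), fun h => hc (Or.inr h)⟩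
      obtain ⟨p, ps, hp⟩ := List.exists_cons_of_ne_nil (piecesR_ne_nil cs)
      simp only [piecesR, hc, delimsR, List.filter_cons, hb] at *
      simp [hp] at ih ⊢
      omega

theorem translate_inv (cs : List Char) : ∀ (ns : List Int) (os temp : List Char),
    (let st := cs.foldl
      (fun (st : List Int × List Char × List Char) c =>
        if ¬ (c = '+' ∨ c = '-') then
          (st.1, st.2.1, st.2.2 ++ [c])
        else
          (st.1 ++ [pyIntD st.2.2], st.2.1 ++ [c], []))
      (ns, os, temp)
     (st.1 ++ [pyIntD st.2.2], st.2.1))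
    = (ns ++ (withTemp temp (piecesR cs)).map pyIntD, os ++ delimsR cs) := by
  induction cs with
  | nil => intro ns os temp; simp [piecesR, withTemp, delimsR]
  | cons c cs ih =>
    intro ns os temp
    by_cases hc : c = '+' ∨ c = '-'
    · simp only [List.foldl_cons, hc, not_true_eq_false, if_false]
      rw [ih]
      obtain ⟨p, ps, hp⟩ := List.exists_cons_of_ne_nil (piecesR_ne_nil cs)
      have hb : (c == '+' || c == '-') = true := by
        rcases hc with h | h <;> simp [h]
      simp [piecesR, hc, hp, withTemp, delimsR, hb]
    · have hb : (c == '+' || c == '-') = false := by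
        simp only [Bool.or_eq_false_iff, beq_eq_false_iff_ne]
        exact ⟨fun h => hc (Or.inl h), fun h => hc (Or.inr h)⟩
      simp only [List.foldl_cons, hc, not_false_eq_true, if_true]
      rw [ih]
      obtain ⟨p, ps, hp⟩ := List.exists_cons_of_ne_nil (piecesR_ne_nil cs)
      simp [piecesR, hc, hp, withTemp, delimsR, hb]

theorem translate_eq (cs : List Char) :
    translateExpression cs = ((piecesR cs).map pyIntD, delimsR cs) := by
  have hfun : (fun (st : List Int × List Char × List Char) c =>
        let (numbers, operators, temp) := st
        if ¬ (c = '+' ∨ c = '-') then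
          (numbers, operators, temp ++ [c])
        else
          (numbers ++ [pyIntD temp], operators ++ [c], ([] : List Char)))
      = (fun (st : List Int × List Char × List Char) c =>
        if ¬ (c = '+' ∨ c = '-') then
          (st.1, st.2.1, st.2.2 ++ [c])
        else
          (st.1 ++ [pyIntD st.2.2], st.2.1 ++ [c], [])) := by
    funext st c; obtain ⟨a, b, t⟩ := st; rfl
  have h := translate_inv cs [] [] []
  simp only [translateExpression, hfun]
  obtain ⟨p, ps, hp⟩ := List.exists_cons_of_ne_nil (piecesR_ne_nil cs)
  simp only [h, hp, withTemp]
  simp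

theorem foldl_range_idx {σ : Type} (f : σ → Char → Int → σ) :
    ∀ (ops : List Char) (nums : List Int) (st : σ),
    nums.length = ops.length + 1 →
    (List.range ops.length).foldl
      (fun st k => f st (ops.getD k ' ') (nums.getD (k + 1) 0)) st
    = (ops.zip nums.tail).foldl (fun st p => f st p.1 p.2) st := by
  intro ops
  induction ops with
  | nil => intro nums st h; simp
  | cons o ops ih =>
    intro nums st h
    obtain ⟨m, nums', rfl⟩ : ∃ m nums', nums = m :: nums' := by
      cases nums with
      | nil => simp at h
      | cons m nums' => exact ⟨m, nums', rfl⟩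
    obtain ⟨v, rest, rfl⟩ : ∃ v rest, nums' = v :: rest := by
      cases nums' with
      | nil => simp at h
      | cons v rest => exact ⟨v, rest, rfl⟩
    simp only [List.length_cons, List.range_succ_eq_map, List.foldl_cons, List.foldl_map]
    have h' : (v :: rest).length = ops.length + 1 := by simpa using h
    have := ih (v :: rest) (f st o v) h'
    simp only [List.getD_cons_succ] at this ⊢
    simp only [List.getD_cons_zero] at *
    rw [this]
    simp

theorem foldl_pyRange_two {σ : Type} (f : σ → Char → Int → σ)
    (ops : List Char) (nums : List Int) (st : σ)
    (h : nums.length = ops.length + 1) :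
    (PySem.List.pyRange 0 (ops.length : Int) 1).foldl
      (fun st i => f st (PySem.List.pyGetD ops i ' ') (PySem.List.pyGetD nums (i + 1) 0)) st
    = (ops.zip nums.tail).foldl (fun st p => f st p.1 p.2) st := by
  rw [PySem.List.pyRange_one]
  simp only [sub_zero, Int.toNat_natCast, List.foldl_map, zero_add]
  have : ∀ (st : σ) (k : Nat),
      f st (PySem.List.pyGetD ops (k : Int) ' ') (PySem.List.pyGetD nums ((k : Int) + 1) 0)
      = f st (ops.getD k ' ') (nums.getD (k + 1) 0) := by
    intro st k
    have h1 : ((k : Int) + 1) = ((k + 1 : Nat) : Int) := by push_cast; ring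
    rw [h1, PySem.List.pyGetD_natCast, PySem.List.pyGetD_natCast]
  simp only [this]
  exact foldl_range_idx f ops nums st h

theorem splitChar_cons_self (d : Char) (cs : List Char) :
    splitChar d (d :: cs) = [] :: splitChar d cs := by
  simp [splitChar]

theorem splitChar_cons_ne (d c : Char) (cs : List Char) (h : c ≠ d)
    (p : List Char) (ps : List (List Char)) (hp : splitChar d cs = p :: ps) :
    splitChar d (c :: cs) = (c :: p) :: ps := by
  simp [splitChar, h, hp]

theorem piecesR_cons_delim (c : Char) (cs : List Char) (h : c = '+' ∨ c = '-') :
    piecesR (c :: cs) = [] :: piecesR cs := by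
  simp [piecesR, h]

theorem piecesR_cons_ne (c : Char) (cs : List Char) (h : ¬ (c = '+' ∨ c = '-'))
    (p : List Char) (ps : List (List Char)) (hp : piecesR cs = p :: ps) :
    piecesR (c :: cs) = (c :: p) :: ps := by
  simp [piecesR, h, hp]

theorem head_piece (cs : List Char) :
    (piecesR cs).headI = (splitChar '+' ((splitChar '-' cs).headI)).headI := by
  induction cs with
  | nil => simp [piecesR, splitChar]
  | cons c cs ih =>
    obtain ⟨s0, rest, hM⟩ := List.exists_cons_of_ne_nil (splitChar_ne_nil '-' cs)
    obtain ⟨p, ps, hp⟩ := List.exists_cons_of_ne_nil (piecesR_ne_nil cs)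
    obtain ⟨q, qs, hq⟩ := List.exists_cons_of_ne_nil (splitChar_ne_nil '+' s0)
    by_cases hminus : c = '-'
    · subst hminus
      rw [piecesR_cons_delim _ _ (Or.inr rfl), splitChar_cons_self]
      simp [splitChar]
    · by_cases hplus : c = '+'
      · subst hplus
        rw [piecesR_cons_delim _ _ (Or.inl rfl),
          splitChar_cons_ne '-' '+' cs (by decide) s0 rest hM]
        simp [splitChar_cons_self]
      · have hc : ¬ (c = '+' ∨ c = '-') := by tauto
        rw [piecesR_cons_ne c cs hc p ps hp,
          splitChar_cons_ne '-' c cs hminus s0 rest hM]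
        rw [hp, hM] at ih
        simp only [List.headI] at ih ⊢
        rw [splitChar_cons_ne '+' c s0 hplus q qs hq]
        simp only [List.headI]
        rw [ih, hq]

theorem tok_decomp (cs : List Char) :
    (delimsR cs).zip ((piecesR cs).tail.map pyIntD)
    = plusPairs ((splitChar '-' cs).headI)
      ++ ((splitChar '-' cs).tail).flatMap segToks := by
  induction cs with
  | nil => simp [delimsR, piecesR, splitChar, plusPairs]
  | cons c cs ih =>
    obtain ⟨s0, rest, hM⟩ := List.exists_cons_of_ne_nil (splitChar_ne_nil '-' cs)
    obtain ⟨p, ps, hp⟩ := List.exists_cons_of_ne_nil (piecesR_ne_nil cs)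
    obtain ⟨q, qs, hq⟩ := List.exists_cons_of_ne_nil (splitChar_ne_nil '+' s0)
    have hhead : p = q := by
      have := head_piece cs
      rw [hp, hM] at this
      simp only [List.headI] at this
      rw [hq] at this
      simpa using this
    rw [hp, hM] at ih
    simp only [List.tail_cons, List.headI] at ih
    by_cases hminus : c = '-'
    · subst hminus
      rw [piecesR_cons_delim _ _ (Or.inr rfl), splitChar_cons_self]
      simp only [List.tail_cons, List.headI, delimsR, List.filter_cons]
      simp only [show (('-' : Char) == '+' || ('-' : Char) == '-') = true from rfl, if_true]
      rw [hp]
      simp only [List.map_cons, List.zip_cons_cons, List.flatMap_cons, segToks]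
      rw [show plusPairs [] = [] from rfl]
      simp only [List.nil_append]
      rw [show (delimsR cs) = List.filter (fun c => c == '+' || c == '-') cs from rfl] at ih
      rw [ih, hM]
      simp [segToks, hq, hhead, List.headI]
    · by_cases hplus : c = '+'
      · subst hplus
        rw [piecesR_cons_delim _ _ (Or.inl rfl),
          splitChar_cons_ne '-' '+' cs (by decide) s0 rest hM]
        simp only [List.tail_cons, List.headI, delimsR, List.filter_cons]
        simp only [show (('+' : Char) == '+' || ('+' : Char) == '-') = true from rfl, if_true]
        rw [hp]
        simp only [List.map_cons, List.zip_cons_cons]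
        rw [show (delimsR cs) = List.filter (fun c => c == '+' || c == '-') cs from rfl] at ih
        rw [ih]
        simp only [plusPairs, splitChar_cons_self, List.tail_cons, hq, List.map_cons,
          List.tail_cons, List.headI, hhead]
        simp
      · have hc : ¬ (c = '+' ∨ c = '-') := by tauto
        have hb : (c == '+' || c == '-') = false := by
          simp only [Bool.or_eq_false_iff, beq_eq_false_iff_ne]; tauto
        rw [piecesR_cons_ne c cs hc p ps hp,
          splitChar_cons_ne '-' c cs hminus s0 rest hM]
        simp only [List.tail_cons, List.headI, delimsR, List.filter_cons, hb,
          Bool.false_eq_true, if_false]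
        rw [show (delimsR cs) = List.filter (fun c => c == '+' || c == '-') cs from rfl] at ih
        rw [ih]
        simp only [plusPairs, splitChar_cons_ne '+' c s0 hplus q qs hq, hq, List.tail_cons]

theorem gfold_plus (vs : List Int) : ∀ (nn : List Int) (a : Int) (no : List Char),
    (vs.map (fun v => (('+' : Char), v))).foldl (fun st p => gstep st p.1 p.2) (nn ++ [a], no)
    = (nn ++ [a + vs.sum], no) := by
  induction vs with
  | nil => intro nn a no; simp
  | cons v vs ih =>
    intro nn a no
    simp only [List.map_cons, List.foldl_cons]
    rw [show gstep (nn ++ [a], no) '+' v = (nn ++ [a + v], no) from by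
      simp [gstep, PySem.List.pyGetD_neg_one_append_singleton, List.dropLast_concat]]
    rw [ih]
    simp [add_assoc]

theorem gfold_segs (rest : List (List Char)) : ∀ (nn : List Int) (no : List Char),
    (rest.flatMap segToks).foldl (fun st p => gstep st p.1 p.2) (nn, no)
    = (nn ++ rest.map segSum, no ++ List.replicate rest.length '-') := by
  induction rest with
  | nil => intro nn no; simp
  | cons seg rest ih =>
    intro nn no
    obtain ⟨q, qs, hq⟩ := List.exists_cons_of_ne_nil (splitChar_ne_nil '+' seg)
    simp only [List.flatMap_cons, List.foldl_append, segToks, List.foldl_cons]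
    rw [show gstep (nn, no) '-' (pyIntD (splitChar '+' seg).headI)
        = (nn ++ [pyIntD (splitChar '+' seg).headI], no ++ ['-']) from by simp [gstep]]
    rw [show plusPairs seg = ((splitChar '+' seg).tail.map pyIntD).map
        (fun v => (('+' : Char), v)) from by simp [plusPairs, List.map_map]; rfl]
    rw [gfold_plus]
    rw [show pyIntD (splitChar '+' seg).headI + ((splitChar '+' seg).tail.map pyIntD).sum
        = segSum seg from by simp [segSum, hq, List.headI]]
    rw [ih]
    simp [List.replicate_succ]

theorem foldl_sub_eq (vs : List Int) : ∀ (a : Int),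
    vs.foldl (fun x y => x - y) a = a - vs.sum := by
  induction vs with
  | nil => intro a; simp
  | cons v vs ih => intro a; simp [ih, List.sum_cons]; ring

theorem zip_replicate_minus (vs : List Int) :
    (List.replicate vs.length '-').zip vs = vs.map (fun v => (('-' : Char), v)) := by
  induction vs with
  | nil => simp
  | cons v vs ih => simp [List.replicate_succ, ih]

theorem cfold_minus (vs : List Int) : ∀ (a : Int),
    (vs.map (fun v => (('-' : Char), v))).foldl (fun st p => cstep st p.1 p.2) a
    = a - vs.sum := by
  induction vs with
  | nil => intro a; simp
  | cons v vs ih =>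
    intro a
    simp only [List.map_cons, List.foldl_cons]
    rw [show cstep a '-' v = a - v from by simp [cstep]]
    rw [ih]
    simp only [List.sum_cons]
    ring

theorem calculate_group (nn : List Int) (n : Nat) (h : nn.length = n + 1) :
    calculate nn (List.replicate n '-') = nn.headI - nn.tail.sum := by
  have hfun : (fun (answer : Int) i =>
      if PySem.List.pyGetD (List.replicate n '-') i ' ' = '-' then
        answer - PySem.List.pyGetD nn (i + 1) 0
      else
        answer + PySem.List.pyGetD nn (i + 1) 0)
      = (fun answer i => cstep answer (PySem.List.pyGetD (List.replicate n '-') i ' ')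
          (PySem.List.pyGetD nn (i + 1) 0)) := by
    funext a i; rfl
  obtain ⟨m, vs, rfl⟩ : ∃ m vs, nn = m :: vs := by
    cases nn with
    | nil => simp at h
    | cons m vs => exact ⟨m, vs, rfl⟩
  simp only [calculate, hfun]
  rw [foldl_pyRange_two cstep (List.replicate n '-') (m :: vs) _ (by simpa using h)]
  simp only [List.tail_cons]
  have hn : n = vs.length := by simpa using h.symm
  subst hn
  rw [zip_replicate_minus vs, cfold_minus]
  simp [PySem.List.pyGetD_zero, List.headI]

theorem solution_eq_alt (expression : String) :
    solution expression = solution_alt expression := by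
  obtain ⟨s0, rest, hM⟩ :=
    List.exists_cons_of_ne_nil (splitChar_ne_nil '-' expression.toList)
  obtain ⟨p, ps, hp⟩ := List.exists_cons_of_ne_nil (piecesR_ne_nil expression.toList)
  obtain ⟨q, qs, hq⟩ := List.exists_cons_of_ne_nil (splitChar_ne_nil '+' s0)
  have hhead : p = q := by
    have := head_piece expression.toList
    rw [hp, hM] at this
    simp only [List.headI] at this
    rw [hq] at this
    simpa using this
  have hfun : (fun (st : List Int × List Char) i =>
      let (newNumbers, newOperators) := st
      if PySem.List.pyGetD (delimsR expression.toList) i ' ' = '-' then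
        (newNumbers ++ [PySem.List.pyGetD ((piecesR expression.toList).map pyIntD) (i + 1) 0],
         newOperators ++ [PySem.List.pyGetD (delimsR expression.toList) i ' '])
      else
        (newNumbers.dropLast ++
           [PySem.List.pyGetD newNumbers (-1) 0
              + PySem.List.pyGetD ((piecesR expression.toList).map pyIntD) (i + 1) 0],
         newOperators))
      = (fun st i => gstep st (PySem.List.pyGetD (delimsR expression.toList) i ' ')
          (PySem.List.pyGetD ((piecesR expression.toList).map pyIntD) (i + 1) 0)) := by
    funext st i; obtain ⟨a, b⟩ := st; rfl
  have hlen : ((piecesR expression.toList).map pyIntD).length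
      = (delimsR expression.toList).length + 1 := by
    simp [piecesR_length]
  simp only [solution, translate_eq]
  rw [hfun, foldl_pyRange_two gstep _ _ _ hlen]
  have htail : ((piecesR expression.toList).map pyIntD).tail
      = (piecesR expression.toList).tail.map pyIntD := by
    rw [hp]; simp
  rw [htail, tok_decomp, hM]
  simp only [List.headI, List.tail_cons]
  have hinit : ([PySem.List.pyGetD ((piecesR expression.toList).map pyIntD) 0 0],
      ([] : List Char))
      = (([] : List Int) ++ [pyIntD ((splitChar '+' s0).headI)], ([] : List Char)) := by
    rw [hp, hq]
    simp [PySem.List.pyGetD_zero, List.headI, hhead]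
  rw [hinit, List.foldl_append]
  rw [show plusPairs s0 = ((splitChar '+' s0).tail.map pyIntD).map
      (fun v => (('+' : Char), v)) from by simp [plusPairs, List.map_map]; rfl]
  rw [gfold_plus]
  rw [show pyIntD (splitChar '+' s0).headI + ((splitChar '+' s0).tail.map pyIntD).sum
      = segSum s0 from by simp [segSum, hq, List.headI]]
  rw [gfold_segs]
  simp only [List.nil_append, List.singleton_append]
  rw [calculate_group (segSum s0 :: rest.map segSum) rest.length (by simp)]
  simp only [List.headI, List.tail_cons]
  simp only [solution_alt, hM]
  rw [← foldl_sub_eq, List.foldl_map]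

-- ===== VERDICT (by name: the statement is the Claim_ definition above) =====
theorem solution_spec : Claim_equal_solution := by
  intro expression _ _
  unfold Spec_solution
  exact solution_eq_alt expression
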